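-- pv_equiv track=rewrite | github.com/johnsonkobe24/CMU-36811-Intro-to-Large-Scale-Computing-Assignments-Codes-not-official- | Assignment1.py | find_sequence
-- ===== SOURCE A (Python) =====
-- def find_sequence (A):
--     Aset = set(A)
--     if len(A)==1:
--         lmax =1
--     else:
--         lmax = 2
--         for j, b in enumerate(A):
--             for i in range(j):
--                 a = A[i]
--                 step = b - a
--                 if b + step-1 in Aset and a - step+1 not in Aset and step-1!=0:
--                     c = b + step-1
--                     count = 3
--                     while (c + step in Aset)or (c+step+1 in Aset) or (c+step-1 in Aset and step-1!=0):
--                         if c+step-1 in Aset and step-1!=0: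
--                             c += step-1
--                         elif c+step in Aset:
--                             c+= step
--                         elif c+step+1 in Aset:
--                             c+= step+1
--                         count=count+1
--                     if count > lmax:
--                         lmax = count
--                 elif b + step in Aset and a - step not in Aset:
--                     c = b + step
--                     count = 3
--                     while (c + step in Aset)or (c+step+1 in Aset) or (c+step-1 in Aset and step-1!=0):
--                         if c+step-1 in Aset and step-1!=0:
--                             c+= step-1
--                         elif c+step in Aset:
--                             c+= step
--                         elif c+step+1 in Aset:
--                             c+= step+1
--                         count=count+1
--                     if count > lmax:
--                         lmax = count
--                 elif b + step+1 in Aset and a - step-1 not in Aset: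
--                     c = b + step+1
--                     count = 3
--                     while (c + step in Aset)or (c+step+1 in Aset) or (c+step-1 in Aset and step-1!=0):
--                         if c+step-1 in Aset and step-1!=0:
--                             c += step-1
--                         elif c+step in Aset:
--                             c+= step
--                         elif c+step+1 in Aset and step+1!=0:
--                             c+= step+1
--                         count=count+1
--                     if count > lmax:
--                         lmax = count
--     return lmax
-- ===== SOURCE B (Python) =====
-- def find_sequence(A):
--     if len(A) == 1:
--         return 1
--     S = set(A)
--
--     def succ(c, step):
--         # the next element A's greedy walk would visit from c (step fixed)
--         if step != 1 and c + step - 1 in S: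
--             return c + step - 1
--         if c + step in S:
--             return c + step
--         if c + step + 1 in S:
--             return c + step + 1
--         return None
--
--     # phase 1: collect the distinct walk start states, grouped by step
--     jobs = {}  # step -> set of start values (each start is a member of S)
--     for j, b in enumerate(A):
--         for i in range(j):
--             a = A[i]
--             step = b - a
--             if b + step - 1 in S and a - step + 1 not in S and step != 1:
--                 jobs.setdefault(step, set()).add(b + step - 1)
--             elif b + step in S and a - step not in S:
--                 jobs.setdefault(step, set()).add(b + step)
--             elif b + step + 1 in S and a - step - 1 not in S:
--                 jobs.setdefault(step, set()).add(b + step + 1)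
--
--     # phase 2: per step, one bottom-up pass over S in reverse walk order
--     # (walks move strictly away from the start, so each chain length is
--     # 1 + the already-computed chain length of its successor)
--     lmax = 2
--     for step, starts in jobs.items():
--         length = {}
--         for c in sorted(S, reverse=(step > 0)):
--             nxt = succ(c, step)
--             length[c] = 0 if nxt is None else 1 + length.get(nxt, 0)
--         for c0 in starts:
--             cnt = 3 + length[c0]
--             if cnt > lmax:
--                 lmax = cnt
--     return lmax
-- ===== Notes on version B (the rewrite author's own statement) =====
-- stated objective: alternative
-- what changed: B replaces A's per-pair greedy while-walks by a two-phase algorithm: first one pair scan only collects the distinct walk start states grouped by step, then for each step a single bottom-up pass over sorted(S) (in reverse walk direction) computes every chain length from its successor's, so no walk is ever stepped through.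
-- outside the precondition, e.g. on find_sequence([2, 2, 1]): A does not finish within the time limit, B returns 4; on find_sequence([2, 0, 1]): A does not finish within the time limit, B returns 4
import Mathlib
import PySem

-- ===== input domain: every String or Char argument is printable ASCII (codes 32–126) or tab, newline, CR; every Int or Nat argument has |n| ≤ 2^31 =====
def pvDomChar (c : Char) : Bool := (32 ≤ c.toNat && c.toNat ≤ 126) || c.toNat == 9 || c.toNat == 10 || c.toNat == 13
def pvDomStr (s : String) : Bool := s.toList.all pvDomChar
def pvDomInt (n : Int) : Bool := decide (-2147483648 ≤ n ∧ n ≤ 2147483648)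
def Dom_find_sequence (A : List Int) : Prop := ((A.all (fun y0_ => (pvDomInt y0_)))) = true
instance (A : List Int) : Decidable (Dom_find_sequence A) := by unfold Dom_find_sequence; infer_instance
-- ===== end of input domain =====

-- B replaces A's per-pair greedy while-walks by a two-phase algorithm (collect start states by
-- step, then one bottom-up pass over sorted(S) per step computes all chain lengths); return
-- values proved equal on Pre_, no speed claim.

-- ===== PORT A =====
-- fuel-bounded transliteration of the while loop in A's FIRST branch; fuel = len(A)+2 suffices
-- whenever the Python loop terminates (Pre_ below excludes exactly the inputs where it does not)
def pvLoopA1 (aset : PySem.Set Int) (step : Int) : Nat → Int → Int → Int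
  | 0, _, count => count
  | fuel+1, c, count =>
    if PySem.Set.contains aset (c + step) || PySem.Set.contains aset (c + step + 1) ||
       (PySem.Set.contains aset (c + step - 1) && step - 1 != 0) then
      if PySem.Set.contains aset (c + step - 1) && step - 1 != 0 then
        pvLoopA1 aset step fuel (c + step - 1) (count + 1)
      else if PySem.Set.contains aset (c + step) then
        pvLoopA1 aset step fuel (c + step) (count + 1)
      else if PySem.Set.contains aset (c + step + 1) then
        pvLoopA1 aset step fuel (c + step + 1) (count + 1)
      else pvLoopA1 aset step fuel c (count + 1)  -- unreachable: the guard is the disjunction of the elifs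
    else count

-- the while loop in A's SECOND branch (source code identical to the first)
def pvLoopA2 (aset : PySem.Set Int) (step : Int) : Nat → Int → Int → Int
  | 0, _, count => count
  | fuel+1, c, count =>
    if PySem.Set.contains aset (c + step) || PySem.Set.contains aset (c + step + 1) ||
       (PySem.Set.contains aset (c + step - 1) && step - 1 != 0) then
      if PySem.Set.contains aset (c + step - 1) && step - 1 != 0 then
        pvLoopA2 aset step fuel (c + step - 1) (count + 1)
      else if PySem.Set.contains aset (c + step) then
        pvLoopA2 aset step fuel (c + step) (count + 1)
      else if PySem.Set.contains aset (c + step + 1) then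
        pvLoopA2 aset step fuel (c + step + 1) (count + 1)
      else pvLoopA2 aset step fuel c (count + 1)
    else count

-- the while loop in A's THIRD branch (its last elif carries an extra 'step+1 != 0' guard)
def pvLoopA3 (aset : PySem.Set Int) (step : Int) : Nat → Int → Int → Int
  | 0, _, count => count
  | fuel+1, c, count =>
    if PySem.Set.contains aset (c + step) || PySem.Set.contains aset (c + step + 1) ||
       (PySem.Set.contains aset (c + step - 1) && step - 1 != 0) then
      if PySem.Set.contains aset (c + step - 1) && step - 1 != 0 then
        pvLoopA3 aset step fuel (c + step - 1) (count + 1)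
      else if PySem.Set.contains aset (c + step) then
        pvLoopA3 aset step fuel (c + step) (count + 1)
      else if PySem.Set.contains aset (c + step + 1) && step + 1 != 0 then
        pvLoopA3 aset step fuel (c + step + 1) (count + 1)
      else pvLoopA3 aset step fuel c (count + 1)
    else count

-- body of A's inner 'for i in range(j)' loop
def pvBodyA (A : List Int) (aset : PySem.Set Int) (b : Int) (lmax : Int) (i : Int) : Int :=
  let a := PySem.List.pyGetD A i 0
  let step := b - a
  if PySem.Set.contains aset (b + step - 1) && !PySem.Set.contains aset (a - step + 1) &&
     step - 1 != 0 then
    let count := pvLoopA1 aset step (A.length + 2) (b + step - 1) 3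
    if count > lmax then count else lmax
  else if PySem.Set.contains aset (b + step) && !PySem.Set.contains aset (a - step) then
    let count := pvLoopA2 aset step (A.length + 2) (b + step) 3
    if count > lmax then count else lmax
  else if PySem.Set.contains aset (b + step + 1) && !PySem.Set.contains aset (a - step - 1) then
    let count := pvLoopA3 aset step (A.length + 2) (b + step + 1) 3
    if count > lmax then count else lmax
  else lmax

def find_sequence (A : List Int) : Int :=
  let aset := PySem.Set.ofList A
  if A.length = 1 then 1
  else
    (PySem.List.enumerate A 0).foldl (fun lmax jb =>
      (PySem.List.pyRange 0 jb.1 1).foldl (pvBodyA A aset jb.2) lmax) 2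

-- ===== PORT B =====
-- Source B's succ(c, step): the next element A's greedy walk would visit from c
def pvSuccB (s : PySem.Set Int) (step c : Int) : Option Int :=
  if step != 1 && PySem.Set.contains s (c + step - 1) then some (c + step - 1)
  else if PySem.Set.contains s (c + step) then some (c + step)
  else if PySem.Set.contains s (c + step + 1) then some (c + step + 1)
  else none

-- phase-1 body: jobs.setdefault(step, set()).add(c0) is insert step (add (getD step ∅) c0)
-- (setdefault keeps an existing entry's position, a new key appends — exactly Dict.insert)
def pvJobsBody (A : List Int) (s : PySem.Set Int) (b : Int)
    (jobs : PySem.Dict Int (PySem.Set Int)) (i : Int) : PySem.Dict Int (PySem.Set Int) :=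
  let a := PySem.List.pyGetD A i 0
  let step := b - a
  if PySem.Set.contains s (b + step - 1) && !PySem.Set.contains s (a - step + 1) && step != 1 then
    PySem.Dict.insert jobs step
      (PySem.Set.add (PySem.Dict.getD jobs step PySem.Set.empty) (b + step - 1))
  else if PySem.Set.contains s (b + step) && !PySem.Set.contains s (a - step) then
    PySem.Dict.insert jobs step
      (PySem.Set.add (PySem.Dict.getD jobs step PySem.Set.empty) (b + step))
  else if PySem.Set.contains s (b + step + 1) && !PySem.Set.contains s (a - step - 1) then
    PySem.Dict.insert jobs step
      (PySem.Set.add (PySem.Dict.getD jobs step PySem.Set.empty) (b + step + 1))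
  else jobs

def pvJobs (A : List Int) (s : PySem.Set Int) : PySem.Dict Int (PySem.Set Int) :=
  (PySem.List.enumerate A 0).foldl (fun jobs jb =>
    (PySem.List.pyRange 0 jb.1 1).foldl (pvJobsBody A s jb.2) jobs) PySem.Dict.empty

-- phase-2 table: length[c] = 0 if succ(c,step) is None else 1 + length.get(succ, 0),
-- filled over sorted(S, reverse=(step > 0))
def pvLenTable (s : PySem.Set Int) (step : Int) : PySem.Dict Int Int :=
  (PySem.List.sorted s (fun x => x) (decide (step > 0))).foldl
    (fun len c =>
      PySem.Dict.insert len c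
        (match pvSuccB s step c with
         | none => 0
         | some nxt => 1 + PySem.Dict.getD len nxt 0))
    PySem.Dict.empty

-- one jobs entry: cnt = 3 + length[c0] (c0 is always a member of S, so the key is present)
def pvStepFold (s : PySem.Set Int) (lmax : Int) (e : Int × PySem.Set Int) : Int :=
  let len := pvLenTable s e.1
  e.2.foldl (fun lmax c0 =>
    let cnt := 3 + PySem.Dict.getD len c0 0
    if cnt > lmax then cnt else lmax) lmax

def find_sequence_alt (A : List Int) : Int :=
  if A.length = 1 then 1
  else
    let s := PySem.Set.ofList A
    ((pvJobs A s).items).foldl (pvStepFold s) 2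

-- ===== PRECONDITION & SPEC =====
-- pvPairs A = the (A[i], A[j]) with i < j that A's double loop visits, in order
def pvPairs (A : List Int) : List (Int × Int) :=
  (PySem.List.enumerate A 0).flatMap (fun jb =>
    (PySem.List.pyRange 0 jb.1 1).map (fun i => (PySem.List.pyGetD A i 0, jb.2)))

-- a pair (a, b) on which A's while loop never terminates: a branch fires with step 0 or -1,
-- whereupon 'c + step in Aset' (resp. 'c + step + 1 in Aset') re-tests c itself forever
def pvDivB (s : PySem.Set Int) (a b : Int) : Bool :=
  (b == a &&
    ((PySem.Set.contains s (b - 1) && !PySem.Set.contains s (b + 1)) ||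
     (PySem.Set.contains s (b + 1) && !PySem.Set.contains s (b - 1)))) ||
  (b == a - 1 &&
    ((PySem.Set.contains s (b - 2) && !PySem.Set.contains s (a + 2)) ||
     (PySem.Set.contains s (b - 1) && !PySem.Set.contains s (a + 1))))

-- Pre_ excludes exactly the inputs on which the Python A never returns (its while loop spins
-- forever on some pair with step 0 or -1); A returns normally on every input satisfying Pre_.
def Pre_find_sequence (A : List Int) : Prop :=
  ((pvPairs A).all (fun ab => !pvDivB (PySem.Set.ofList A) ab.1 ab.2)) = true
instance (A : List Int) : Decidable (Pre_find_sequence A) := by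
  unfold Pre_find_sequence; infer_instance

def pvWitness_find_sequence : List Int := [1, 2, 3]

def Spec_find_sequence (A : List Int) (out : Int) : Prop := out = find_sequence_alt A
instance (A : List Int) (out : Int) : Decidable (Spec_find_sequence A out) := by
  unfold Spec_find_sequence; infer_instance

-- ===== CLAIM (what is proved, stated in full; the proofs are below) =====
def Claim_equal_find_sequence : Prop :=
  ∀ (A : List Int), Dom_find_sequence A → Pre_find_sequence A →
    Spec_find_sequence A (find_sequence A)

-- ===== LEMMAS AND PROOFS =====

-- (step - 1 != 0) in A's source is (step != 1) in Source B's
theorem pvStepNe (step : Int) : ((step - 1 : Int) != 0) = (step != 1) := by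
  by_cases h : step = 1
  · subst h; decide
  · have h1 : step - 1 ≠ 0 := by omega
    simp [bne, h, h1]

-- which branch fires on the pair (a, b), and the start value of the walk
def pvFired (s : PySem.Set Int) (a b : Int) : Option (Int × Int) :=
  let step := b - a
  if PySem.Set.contains s (b + step - 1) && !PySem.Set.contains s (a - step + 1) &&
     step - 1 != 0 then some (step, b + step - 1)
  else if PySem.Set.contains s (b + step) && !PySem.Set.contains s (a - step) then
    some (step, b + step)
  else if PySem.Set.contains s (b + step + 1) && !PySem.Set.contains s (a - step - 1) then
    some (step, b + step + 1)
  else none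

-- number of S-elements strictly beyond c in the walk direction: the decreasing measure
def pvMeas (s : PySem.Set Int) (step c : Int) : Nat :=
  s.countP (fun x => if 1 ≤ step then decide (c < x) else decide (x < c))

-- fuel-bounded number of moves of the greedy walk
def pvMoves (s : PySem.Set Int) (step : Int) : Nat → Int → Int
  | 0, _ => 0
  | f+1, c =>
    match pvSuccB s step c with
    | some c' => 1 + pvMoves s step f c'
    | none => 0

-- the stable (fuel-independent) number of moves
def pvStable (s : PySem.Set Int) (step c : Int) : Int := pvMoves s step (pvMeas s step c) c

def pvMx (m x : Int) : Int := if x > m then x else m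

def pvCntStep (s : PySem.Set Int) (lmax : Int) (o : Option (Int × Int)) : Int :=
  match o with
  | none => lmax
  | some sc => pvMx lmax (3 + pvStable s sc.1 sc.2)

theorem pv_countP_lt {α : Type} (l : List α) (p q : α → Bool)
    (himp : ∀ x ∈ l, p x = true → q x = true) (y : α) (hy : y ∈ l) (hqy : q y = true)
    (hpy : p y = false) : l.countP p < l.countP q := by
  induction l with
  | nil => cases hy
  | cons x xs ih =>
    rcases List.mem_cons.mp hy with rfl | hy'
    · have hle : xs.countP p ≤ xs.countP q :=
        List.countP_mono_left (fun z hz hp => himp z (List.mem_cons_of_mem _ hz) hp)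
      simp [hpy, hqy]; omega
    · have hlt : xs.countP p < xs.countP q :=
        ih (fun z hz hp => himp z (List.mem_cons_of_mem _ hz) hp) hy'
      have hx : p x = true → q x = true := himp x (List.mem_cons_self) 
      simp only [List.countP_cons]
      by_cases hpx : p x = true
      · simp [hpx, hx hpx]; omega
      · simp only [Bool.not_eq_true] at hpx
        simp [hpx]
        split <;> omega

theorem pvSucc_dir (s : PySem.Set Int) (step c c' : Int) (hgood : 1 ≤ step ∨ step ≤ -2)
    (h : pvSuccB s step c = some c') :
    c' ∈ s ∧ (if 1 ≤ step then c < c' else c' < c) := by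
  unfold pvSuccB at h
  split_ifs at h with h1 h2 h3
  · obtain ⟨hne, hc⟩ := Bool.and_eq_true_iff.mp h1
    have hne' : step ≠ 1 := by simpa using hne
    injection h with h; subst h
    refine ⟨(PySem.Set.contains_iff s _).mp hc, ?_⟩
    rcases hgood with hg | hg
    · have : 2 ≤ step := by omega
      simp only [if_pos hg]
      omega
    · have : ¬ (1 ≤ step) := by omega
      simp only [if_neg this]; omega
  · injection h with h; subst h
    refine ⟨(PySem.Set.contains_iff s _).mp h2, ?_⟩
    rcases hgood with hg | hg
    · simp only [if_pos hg]; omega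
    · have : ¬ (1 ≤ step) := by omega
      simp only [if_neg this]; omega
  · injection h with h; subst h
    refine ⟨(PySem.Set.contains_iff s _).mp h3, ?_⟩
    rcases hgood with hg | hg
    · simp only [if_pos hg]; omega
    · have : ¬ (1 ≤ step) := by omega
      simp only [if_neg this]; omega

theorem pvMeas_lt (s : PySem.Set Int) (step c c' : Int) (hgood : 1 ≤ step ∨ step ≤ -2)
    (h : pvSuccB s step c = some c') : pvMeas s step c' < pvMeas s step c := by
  obtain ⟨hmem, hdir⟩ := pvSucc_dir s step c c' hgood h
  unfold pvMeas
  refine pv_countP_lt s _ _ (fun x hx hp => ?_) c' hmem ?_ ?_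
  · rcases hgood with hg | hg
    · have h1 : (1 ≤ step) := hg
      simp only [if_pos h1] at hp hdir ⊢
      simp only [decide_eq_true_eq] at *; omega
    · have h1 : ¬ (1 ≤ step) := by omega
      simp only [if_neg h1] at hp hdir ⊢
      simp only [decide_eq_true_eq] at *; omega
  · split at hdir <;> simp_all
  · split <;> simp

theorem pvMeas_pos (s : PySem.Set Int) (step c c' : Int) (hgood : 1 ≤ step ∨ step ≤ -2)
    (h : pvSuccB s step c = some c') : 1 ≤ pvMeas s step c := by
  obtain ⟨hmem, hdir⟩ := pvSucc_dir s step c c' hgood h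
  unfold pvMeas
  have : 0 < s.countP (fun x => if 1 ≤ step then decide (c < x) else decide (x < c)) := by
    rw [List.countP_pos_iff]
    exact ⟨c', hmem, by split at hdir <;> simp_all⟩
  omega

theorem pvMoves_none (s : PySem.Set Int) (step c : Int) (h : pvSuccB s step c = none) :
    ∀ f, pvMoves s step f c = 0 := by
  intro f
  cases f with
  | zero => rfl
  | succ f => simp [pvMoves, h]

theorem pvMoves_stable (s : PySem.Set Int) (step : Int) (hgood : 1 ≤ step ∨ step ≤ -2) :
    ∀ (n : Nat) (c : Int) (f : Nat), pvMeas s step c ≤ n → n ≤ f →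
      pvMoves s step f c = pvMoves s step n c := by
  intro n
  induction n with
  | zero =>
    intro c f hm hf
    cases hs : pvSuccB s step c with
    | none => rw [pvMoves_none s step c hs, pvMoves_none s step c hs]
    | some c' =>
      exact absurd hm (by have := pvMeas_pos s step c c' hgood hs; omega)
  | succ n ih =>
    intro c f hm hf
    cases hs : pvSuccB s step c with
    | none => rw [pvMoves_none s step c hs, pvMoves_none s step c hs]
    | some c' =>
      obtain ⟨f', rfl⟩ : ∃ f', f = f' + 1 := ⟨f - 1, by omega⟩
      simp only [pvMoves, hs]
      have hm' : pvMeas s step c' ≤ n := by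
        have := pvMeas_lt s step c c' hgood hs; omega
      rw [ih c' f' hm' (by omega)]

theorem pvMoves_eq_stable (s : PySem.Set Int) (step c : Int) (f : Nat)
    (hgood : 1 ≤ step ∨ step ≤ -2) (hf : pvMeas s step c ≤ f) :
    pvMoves s step f c = pvStable s step c := by
  exact pvMoves_stable s step hgood (pvMeas s step c) c f le_rfl hf

theorem pvStable_succ (s : PySem.Set Int) (step c c' : Int) (hgood : 1 ≤ step ∨ step ≤ -2)
    (h : pvSuccB s step c = some c') : pvStable s step c = 1 + pvStable s step c' := by
  have hpos := pvMeas_pos s step c c' hgood h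
  obtain ⟨m, hm⟩ : ∃ m, pvMeas s step c = m + 1 := ⟨pvMeas s step c - 1, by omega⟩
  unfold pvStable
  rw [hm]
  simp only [pvMoves, h]
  congr 1
  exact pvMoves_stable s step hgood (pvMeas s step c') c' m
    le_rfl (by have := pvMeas_lt s step c c' hgood h; omega)

theorem pvLoopA1_moves (s : PySem.Set Int) (step : Int) :
    ∀ (fuel : Nat) (c count : Int),
      pvLoopA1 s step fuel c count = count + pvMoves s step fuel c := by
  intro fuel
  induction fuel with
  | zero => intro c count; simp [pvLoopA1, pvMoves]
  | succ f ih =>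
    intro c count
    by_cases h1 : (PySem.Set.contains s (c + step - 1) && (step - 1 != 0)) = true
    · have hct := (Bool.and_eq_true_iff.mp h1).1
      have hne1 : (step != 1) = true := by rw [← pvStepNe]; exact (Bool.and_eq_true_iff.mp h1).2
      have hsucc : pvSuccB s step c = some (c + step - 1) := by
        unfold pvSuccB; rw [if_pos (Bool.and_eq_true_iff.mpr ⟨hne1, hct⟩)]
      have hguard : (PySem.Set.contains s (c + step) || PySem.Set.contains s (c + step + 1) ||
          (PySem.Set.contains s (c + step - 1) && step - 1 != 0)) = true := by
        rw [h1, Bool.or_true]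
      simp only [pvLoopA1]
      rw [if_pos hguard, if_pos h1, ih]
      simp only [pvMoves, hsucc]
      omega
    · have h1' : (step != 1 && PySem.Set.contains s (c + step - 1)) = false := by
        rw [← pvStepNe, Bool.and_comm]
        simpa using h1
      have h1f : (PySem.Set.contains s (c + step - 1) && (step - 1 != 0)) = false := by
        simpa using h1
      by_cases h2 : PySem.Set.contains s (c + step) = true
      · have hsucc : pvSuccB s step c = some (c + step) := by
          unfold pvSuccB
          rw [if_neg (by rw [h1']; exact Bool.false_ne_true), if_pos h2]
        have hguard : (PySem.Set.contains s (c + step) || PySem.Set.contains s (c + step + 1) ||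
            (PySem.Set.contains s (c + step - 1) && step - 1 != 0)) = true := by
          rw [h2, Bool.true_or, Bool.true_or]
        simp only [pvLoopA1]
        rw [if_pos hguard, if_neg (by rw [h1f]; exact Bool.false_ne_true), if_pos h2, ih]
        simp only [pvMoves, hsucc]
        omega
      · have h2f : PySem.Set.contains s (c + step) = false := by simpa using h2
        by_cases h3 : PySem.Set.contains s (c + step + 1) = true
        · have hsucc : pvSuccB s step c = some (c + step + 1) := by
            unfold pvSuccB
            rw [if_neg (by rw [h1']; exact Bool.false_ne_true), if_neg h2, if_pos h3]
          have hguard : (PySem.Set.contains s (c + step) || PySem.Set.contains s (c + step + 1) ||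
              (PySem.Set.contains s (c + step - 1) && step - 1 != 0)) = true := by
            rw [h2f, h3]; rfl
          simp only [pvLoopA1]
          rw [if_pos hguard, if_neg (by rw [h1f]; exact Bool.false_ne_true), if_neg h2,
            if_pos h3, ih]
          simp only [pvMoves, hsucc]
          omega
        · have h3f : PySem.Set.contains s (c + step + 1) = false := by simpa using h3
          have hsucc : pvSuccB s step c = none := by
            unfold pvSuccB
            rw [if_neg (by rw [h1']; exact Bool.false_ne_true), if_neg h2, if_neg h3]
          have hguard : (PySem.Set.contains s (c + step) || PySem.Set.contains s (c + step + 1) ||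
              (PySem.Set.contains s (c + step - 1) && step - 1 != 0)) = false := by
            rw [h2f, h3f, h1f]; rfl
          simp only [pvLoopA1]
          rw [if_neg (by rw [hguard]; exact Bool.false_ne_true)]
          simp only [pvMoves, hsucc]
          omega

theorem pvLoopA2_moves (s : PySem.Set Int) (step : Int) :
    ∀ (fuel : Nat) (c count : Int),
      pvLoopA2 s step fuel c count = count + pvMoves s step fuel c := by
  intro fuel
  induction fuel with
  | zero => intro c count; simp [pvLoopA2, pvMoves]
  | succ f ih =>
    intro c count
    by_cases h1 : (PySem.Set.contains s (c + step - 1) && (step - 1 != 0)) = true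
    · have hct := (Bool.and_eq_true_iff.mp h1).1
      have hne1 : (step != 1) = true := by rw [← pvStepNe]; exact (Bool.and_eq_true_iff.mp h1).2
      have hsucc : pvSuccB s step c = some (c + step - 1) := by
        unfold pvSuccB; rw [if_pos (Bool.and_eq_true_iff.mpr ⟨hne1, hct⟩)]
      have hguard : (PySem.Set.contains s (c + step) || PySem.Set.contains s (c + step + 1) ||
          (PySem.Set.contains s (c + step - 1) && step - 1 != 0)) = true := by
        rw [h1, Bool.or_true]
      simp only [pvLoopA2]
      rw [if_pos hguard, if_pos h1, ih]
      simp only [pvMoves, hsucc]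
      omega
    · have h1' : (step != 1 && PySem.Set.contains s (c + step - 1)) = false := by
        rw [← pvStepNe, Bool.and_comm]
        simpa using h1
      have h1f : (PySem.Set.contains s (c + step - 1) && (step - 1 != 0)) = false := by
        simpa using h1
      by_cases h2 : PySem.Set.contains s (c + step) = true
      · have hsucc : pvSuccB s step c = some (c + step) := by
          unfold pvSuccB
          rw [if_neg (by rw [h1']; exact Bool.false_ne_true), if_pos h2]
        have hguard : (PySem.Set.contains s (c + step) || PySem.Set.contains s (c + step + 1) ||
            (PySem.Set.contains s (c + step - 1) && step - 1 != 0)) = true := by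
          rw [h2, Bool.true_or, Bool.true_or]
        simp only [pvLoopA2]
        rw [if_pos hguard, if_neg (by rw [h1f]; exact Bool.false_ne_true), if_pos h2, ih]
        simp only [pvMoves, hsucc]
        omega
      · have h2f : PySem.Set.contains s (c + step) = false := by simpa using h2
        by_cases h3 : PySem.Set.contains s (c + step + 1) = true
        · have hsucc : pvSuccB s step c = some (c + step + 1) := by
            unfold pvSuccB
            rw [if_neg (by rw [h1']; exact Bool.false_ne_true), if_neg h2, if_pos h3]
          have hguard : (PySem.Set.contains s (c + step) || PySem.Set.contains s (c + step + 1) ||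
              (PySem.Set.contains s (c + step - 1) && step - 1 != 0)) = true := by
            rw [h2f, h3]; rfl
          simp only [pvLoopA2]
          rw [if_pos hguard, if_neg (by rw [h1f]; exact Bool.false_ne_true), if_neg h2,
            if_pos h3, ih]
          simp only [pvMoves, hsucc]
          omega
        · have h3f : PySem.Set.contains s (c + step + 1) = false := by simpa using h3
          have hsucc : pvSuccB s step c = none := by
            unfold pvSuccB
            rw [if_neg (by rw [h1']; exact Bool.false_ne_true), if_neg h2, if_neg h3]
          have hguard : (PySem.Set.contains s (c + step) || PySem.Set.contains s (c + step + 1) ||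
              (PySem.Set.contains s (c + step - 1) && step - 1 != 0)) = false := by
            rw [h2f, h3f, h1f]; rfl
          simp only [pvLoopA2]
          rw [if_neg (by rw [hguard]; exact Bool.false_ne_true)]
          simp only [pvMoves, hsucc]
          omega

theorem pvLoopA3_moves (s : PySem.Set Int) (step : Int) (hs : step + 1 ≠ 0) :
    ∀ (fuel : Nat) (c count : Int),
      pvLoopA3 s step fuel c count = count + pvMoves s step fuel c := by
  intro fuel
  induction fuel with
  | zero => intro c count; simp [pvLoopA3, pvMoves]
  | succ f ih =>
    intro c count
    by_cases h1 : (PySem.Set.contains s (c + step - 1) && (step - 1 != 0)) = true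
    · have hct := (Bool.and_eq_true_iff.mp h1).1
      have hne1 : (step != 1) = true := by rw [← pvStepNe]; exact (Bool.and_eq_true_iff.mp h1).2
      have hsucc : pvSuccB s step c = some (c + step - 1) := by
        unfold pvSuccB; rw [if_pos (Bool.and_eq_true_iff.mpr ⟨hne1, hct⟩)]
      have hguard : (PySem.Set.contains s (c + step) || PySem.Set.contains s (c + step + 1) ||
          (PySem.Set.contains s (c + step - 1) && step - 1 != 0)) = true := by
        rw [h1, Bool.or_true]
      simp only [pvLoopA3]
      rw [if_pos hguard, if_pos h1, ih]
      simp only [pvMoves, hsucc]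
      omega
    · have h1' : (step != 1 && PySem.Set.contains s (c + step - 1)) = false := by
        rw [← pvStepNe, Bool.and_comm]
        simpa using h1
      have h1f : (PySem.Set.contains s (c + step - 1) && (step - 1 != 0)) = false := by
        simpa using h1
      by_cases h2 : PySem.Set.contains s (c + step) = true
      · have hsucc : pvSuccB s step c = some (c + step) := by
          unfold pvSuccB
          rw [if_neg (by rw [h1']; exact Bool.false_ne_true), if_pos h2]
        have hguard : (PySem.Set.contains s (c + step) || PySem.Set.contains s (c + step + 1) ||
            (PySem.Set.contains s (c + step - 1) && step - 1 != 0)) = true := by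
          rw [h2, Bool.true_or, Bool.true_or]
        simp only [pvLoopA3]
        rw [if_pos hguard, if_neg (by rw [h1f]; exact Bool.false_ne_true), if_pos h2, ih]
        simp only [pvMoves, hsucc]
        omega
      · have h2f : PySem.Set.contains s (c + step) = false := by simpa using h2
        by_cases h3 : PySem.Set.contains s (c + step + 1) = true
        · have hs1 : (step + 1 != 0) = true := by simpa using hs
          have hsucc : pvSuccB s step c = some (c + step + 1) := by
            unfold pvSuccB
            rw [if_neg (by rw [h1']; exact Bool.false_ne_true), if_neg h2, if_pos h3]
          have hguard : (PySem.Set.contains s (c + step) || PySem.Set.contains s (c + step + 1) ||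
              (PySem.Set.contains s (c + step - 1) && step - 1 != 0)) = true := by
            rw [h2f, h3]; rfl
          simp only [pvLoopA3]
          rw [if_pos hguard, if_neg (by rw [h1f]; exact Bool.false_ne_true), if_neg h2,
            if_pos (Bool.and_eq_true_iff.mpr ⟨h3, hs1⟩), ih]
          simp only [pvMoves, hsucc]
          omega
        · have h3f : PySem.Set.contains s (c + step + 1) = false := by simpa using h3
          have hsucc : pvSuccB s step c = none := by
            unfold pvSuccB
            rw [if_neg (by rw [h1']; exact Bool.false_ne_true), if_neg h2, if_neg h3]
          have hguard : (PySem.Set.contains s (c + step) || PySem.Set.contains s (c + step + 1) ||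
              (PySem.Set.contains s (c + step - 1) && step - 1 != 0)) = false := by
            rw [h2f, h3f, h1f]; rfl
          simp only [pvLoopA3]
          rw [if_neg (by rw [hguard]; exact Bool.false_ne_true)]
          simp only [pvMoves, hsucc]
          omega

theorem pvFired_good (s : PySem.Set Int) (a b st c0 : Int) (ha : a ∈ s)
    (hdiv : pvDivB s a b = false) (h : pvFired s a b = some (st, c0)) :
    (1 ≤ st ∨ st ≤ -2) ∧ c0 ∈ s := by
  have hmem : ∀ t, PySem.Set.contains s t = false → t ∉ s := by
    intro t ht hmt
    rw [(PySem.Set.contains_iff s t).mpr hmt] at ht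
    cases ht
  have hdvt : ¬ pvDivB s a b = true := by rw [hdiv]; exact Bool.false_ne_true
  unfold pvFired at h
  simp only [] at h
  set step := b - a with hstep
  split_ifs at h with h1 h2 h3
  · obtain ⟨h12, hne⟩ := Bool.and_eq_true_iff.mp h1
    obtain ⟨hc1, hn1⟩ := Bool.and_eq_true_iff.mp h12
    have hn1' : PySem.Set.contains s (a - step + 1) = false := by simpa using hn1
    simp only [Option.some.injEq, Prod.mk.injEq] at h
    obtain ⟨h5, h6⟩ := h
    subst h5; subst h6
    refine ⟨?_, (PySem.Set.contains_iff s _).mp hc1⟩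
    by_contra hbad
    have h0 : step = 0 ∨ step = -1 := by omega
    apply hdvt
    unfold pvDivB
    rcases h0 with h0 | h0
    · have hx : PySem.Set.contains s (b - 1) = true := by
        rwa [show b + step - 1 = b - 1 by omega] at hc1
      have hy : PySem.Set.contains s (b + 1) = false := by
        rwa [show a - step + 1 = b + 1 by omega] at hn1'
      have hba : (b == a) = true := by simp; omega
      rw [hba, hx, hy]
      rfl
    · have hx : PySem.Set.contains s (b - 2) = true := by
        rwa [show b + step - 1 = b - 2 by omega] at hc1
      have hy : PySem.Set.contains s (a + 2) = false := by
        rwa [show a - step + 1 = a + 2 by omega] at hn1'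
      have hba : (b == a - 1) = true := by simp; omega
      rw [hba, hx, hy]
      simp
  · obtain ⟨hc2, hn2⟩ := Bool.and_eq_true_iff.mp h2
    have hn2' : PySem.Set.contains s (a - step) = false := by simpa using hn2
    simp only [Option.some.injEq, Prod.mk.injEq] at h
    obtain ⟨h5, h6⟩ := h
    subst h5; subst h6
    refine ⟨?_, (PySem.Set.contains_iff s _).mp hc2⟩
    by_contra hbad
    have h0 : step = 0 ∨ step = -1 := by omega
    rcases h0 with h0 | h0
    · exact hmem _ (by rwa [show a - step = a by omega] at hn2') ha
    · apply hdvt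
      unfold pvDivB
      have hx : PySem.Set.contains s (b - 1) = true := by
        rwa [show b + step = b - 1 by omega] at hc2
      have hy : PySem.Set.contains s (a + 1) = false := by
        rwa [show a - step = a + 1 by omega] at hn2'
      have hba : (b == a - 1) = true := by simp; omega
      rw [hba, hx, hy]
      simp
  · obtain ⟨hc3, hn3⟩ := Bool.and_eq_true_iff.mp h3
    have hn3' : PySem.Set.contains s (a - step - 1) = false := by simpa using hn3
    simp only [Option.some.injEq, Prod.mk.injEq] at h
    obtain ⟨h5, h6⟩ := h
    subst h5; subst h6
    refine ⟨?_, (PySem.Set.contains_iff s _).mp hc3⟩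
    by_contra hbad
    have h0 : step = 0 ∨ step = -1 := by omega
    rcases h0 with h0 | h0
    · apply hdvt
      unfold pvDivB
      have hx : PySem.Set.contains s (b + 1) = true := by
        rwa [show b + step + 1 = b + 1 by omega] at hc3
      have hy : PySem.Set.contains s (b - 1) = false := by
        rwa [show a - step - 1 = b - 1 by omega] at hn3'
      have hba : (b == a) = true := by simp; omega
      rw [hba, hx, hy]
      rfl
    · exact hmem _ (by rwa [show a - step - 1 = a by omega] at hn3') ha

def pvGA (n : Nat) (s : PySem.Set Int) (a b lmax : Int) : Int :=
  let step := b - a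
  if PySem.Set.contains s (b + step - 1) && !PySem.Set.contains s (a - step + 1) &&
     step - 1 != 0 then
    let count := pvLoopA1 s step n (b + step - 1) 3
    if count > lmax then count else lmax
  else if PySem.Set.contains s (b + step) && !PySem.Set.contains s (a - step) then
    let count := pvLoopA2 s step n (b + step) 3
    if count > lmax then count else lmax
  else if PySem.Set.contains s (b + step + 1) && !PySem.Set.contains s (a - step - 1) then
    let count := pvLoopA3 s step n (b + step + 1) 3
    if count > lmax then count else lmax
  else lmax

theorem pvBodyA_eq_GA (A : List Int) (s : PySem.Set Int) (b lmax : Int) (i : Int) :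
    pvBodyA A s b lmax i = pvGA (A.length + 2) s (PySem.List.pyGetD A i 0) b lmax := rfl

theorem pvMeas_le (s : PySem.Set Int) (step c : Int) : pvMeas s step c ≤ s.length :=
  List.countP_le_length

theorem pvGA_abs (n : Nat) (s : PySem.Set Int) (a b lmax : Int) (hn : s.length ≤ n)
    (ha : a ∈ s) (hdiv : pvDivB s a b = false) :
    pvGA n s a b lmax = pvCntStep s lmax (pvFired s a b) := by
  simp only [pvGA]
  by_cases h1 : (PySem.Set.contains s (b + (b - a) - 1) &&
      !PySem.Set.contains s (a - (b - a) + 1) && (b - a - 1 != 0)) = true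
  · have hf : pvFired s a b = some (b - a, b + (b - a) - 1) := by
      unfold pvFired
      simp only []
      rw [if_pos h1]
    obtain ⟨hgood, hc0⟩ := pvFired_good s a b _ _ ha hdiv hf
    rw [if_pos h1, pvLoopA1_moves, pvMoves_eq_stable s _ _ n hgood
      (le_trans (pvMeas_le s _ _) hn), hf]
    simp only [pvCntStep, pvMx]
  · by_cases h2 : (PySem.Set.contains s (b + (b - a)) &&
        !PySem.Set.contains s (a - (b - a))) = true
    · have hf : pvFired s a b = some (b - a, b + (b - a)) := by
        unfold pvFired
        simp only []
        rw [if_neg h1, if_pos h2]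
      obtain ⟨hgood, hc0⟩ := pvFired_good s a b _ _ ha hdiv hf
      rw [if_neg h1, if_pos h2, pvLoopA2_moves, pvMoves_eq_stable s _ _ n hgood
        (le_trans (pvMeas_le s _ _) hn), hf]
      simp only [pvCntStep, pvMx]
    · by_cases h3 : (PySem.Set.contains s (b + (b - a) + 1) &&
          !PySem.Set.contains s (a - (b - a) - 1)) = true
      · have hf : pvFired s a b = some (b - a, b + (b - a) + 1) := by
          unfold pvFired
          simp only []
          rw [if_neg h1, if_neg h2, if_pos h3]
        obtain ⟨hgood, hc0⟩ := pvFired_good s a b _ _ ha hdiv hf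
        have hs : (b - a) + 1 ≠ 0 := by
          intro h0
          have he : a - (b - a) - 1 = a := by omega
          have hn3 : PySem.Set.contains s (a - (b - a) - 1) = false := by
            have := (Bool.and_eq_true_iff.mp h3).2
            simpa using this
          rw [he] at hn3
          rw [(PySem.Set.contains_iff s a).mpr ha] at hn3
          cases hn3
        rw [if_neg h1, if_neg h2, if_pos h3, pvLoopA3_moves s _ hs,
          pvMoves_eq_stable s _ _ n hgood (le_trans (pvMeas_le s _ _) hn), hf]
        simp only [pvCntStep, pvMx]
      · have hf : pvFired s a b = none := by
          unfold pvFired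
          simp only []
          rw [if_neg h1, if_neg h2, if_neg h3]
        rw [if_neg h1, if_neg h2, if_neg h3, hf]
        rfl

def pvJB (s : PySem.Set Int) (jobs : PySem.Dict Int (PySem.Set Int)) (ab : Int × Int) :
    PySem.Dict Int (PySem.Set Int) :=
  match pvFired s ab.1 ab.2 with
  | none => jobs
  | some sc =>
    PySem.Dict.insert jobs sc.1
      (PySem.Set.add (PySem.Dict.getD jobs sc.1 PySem.Set.empty) sc.2)

theorem pvBodyB_abs (A : List Int) (s : PySem.Set Int) (b : Int)
    (jobs : PySem.Dict Int (PySem.Set Int)) (i : Int) :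
    pvJobsBody A s b jobs i = pvJB s jobs (PySem.List.pyGetD A i 0, b) := by
  simp only [pvJobsBody, pvJB, pvFired]
  rw [← pvStepNe]
  split_ifs <;> rfl

def pvJMem (jobs : PySem.Dict Int (PySem.Set Int)) (st c0 : Int) : Prop :=
  ∃ g, jobs.get? st = some g ∧ c0 ∈ g

theorem pvJMem_fold (s : PySem.Set Int) :
    ∀ (ps : List (Int × Int)) (jobs : PySem.Dict Int (PySem.Set Int)) (st c0 : Int),
      pvJMem (ps.foldl (pvJB s) jobs) st c0 ↔
        pvJMem jobs st c0 ∨ (st, c0) ∈ ps.filterMap (fun ab => pvFired s ab.1 ab.2) := by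
  intro ps
  induction ps with
  | nil => intro jobs st c0; simp
  | cons ab ps ih =>
    intro jobs st c0
    simp only [List.foldl_cons, List.filterMap_cons]
    cases hf : pvFired s ab.1 ab.2 with
    | none =>
      rw [show pvJB s jobs ab = jobs from by unfold pvJB; rw [hf]]
      exact ih jobs st c0
    | some sc =>
      rw [show pvJB s jobs ab =
          PySem.Dict.insert jobs sc.1
            (PySem.Set.add (PySem.Dict.getD jobs sc.1 PySem.Set.empty) sc.2) from by
        unfold pvJB; rw [hf]]
      rw [ih]
      have hstep : pvJMem (PySem.Dict.insert jobs sc.1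
          (PySem.Set.add (PySem.Dict.getD jobs sc.1 PySem.Set.empty) sc.2)) st c0 ↔
          pvJMem jobs st c0 ∨ (st, c0) = sc := by
        unfold pvJMem
        by_cases hst : st = sc.1
        · subst hst
          constructor
          · rintro ⟨g, hg, hcg⟩
            rw [PySem.Dict.get?_insert] at hg
            rw [if_pos rfl] at hg
            obtain rfl := (Option.some.inj hg).symm
            rcases (PySem.Set.mem_add _ _ _).mp hcg with hcg | rfl
            · left
              unfold PySem.Dict.getD at hcg
              cases hq : jobs.get? sc.1 with
              | none => rw [hq] at hcg; cases hcg
              | some g0 => rw [hq] at hcg; exact ⟨g0, rfl, hcg⟩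
            · right; rfl
          · intro hh
            have hget : (PySem.Dict.insert jobs sc.1
                (PySem.Set.add (PySem.Dict.getD jobs sc.1 PySem.Set.empty) sc.2)).get? sc.1 =
                some (PySem.Set.add (PySem.Dict.getD jobs sc.1 PySem.Set.empty) sc.2) := by
              rw [PySem.Dict.get?_insert]
              simp
            refine ⟨_, hget, ?_⟩
            rcases hh with ⟨g, hg, hcg⟩ | heq
            · apply (PySem.Set.mem_add _ _ _).mpr
              left
              unfold PySem.Dict.getD
              rw [hg]
              exact hcg
            · apply (PySem.Set.mem_add _ _ _).mpr
              right
              exact (congrArg Prod.snd heq).symm ▸ rfl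
        · constructor
          · rintro ⟨g, hg, hcg⟩
            rw [PySem.Dict.get?_insert] at hg
            rw [if_neg hst] at hg
            exact Or.inl ⟨g, hg, hcg⟩
          · intro hh
            rcases hh with ⟨g, hg, hcg⟩ | heq
            · refine ⟨g, ?_, hcg⟩
              rw [PySem.Dict.get?_insert, if_neg hst]
              exact hg
            · exact absurd (congrArg Prod.fst heq) hst
      rw [hstep]
      simp only [List.mem_cons]
      tauto

theorem pvKeys_nodup_insert {ν : Type} (d : PySem.Dict Int ν) (k : Int) (v : ν)
    (h : d.keys.Nodup) : (d.insert k v).keys.Nodup := by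
  simp only [PySem.Dict.keys] at *
  rw [PySem.Dict.items_insert]
  by_cases hc : d.contains k = true
  · rw [if_pos hc, List.map_map]
    have he : ((fun p => p.1) ∘ fun p : Int × ν => if p.1 == k then (k, v) else p) =
        fun p : Int × ν => p.1 := by
      funext p
      simp only [Function.comp]
      split
      · next hh => exact (beq_iff_eq.mp hh).symm
      · rfl
    rw [he]
    exact h
  · rw [if_neg hc]
    have hk : k ∉ d.items.map (fun p => p.1) := by
      rw [PySem.Dict.contains_eq_decide_mem_keys] at hc
      simpa [PySem.Dict.keys] using hc
    simp only [List.map_append, List.map_cons, List.map_nil]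
    rw [List.nodup_append]
    refine ⟨h, by simp, ?_⟩
    intro a ha b hb
    rcases List.mem_singleton.mp (by simpa using hb) with rfl
    intro hh
    exact hk (hh ▸ ha)

theorem pvJobs_keys_nodup (s : PySem.Set Int) :
    ∀ (ps : List (Int × Int)) (jobs : PySem.Dict Int (PySem.Set Int)),
      jobs.keys.Nodup → (ps.foldl (pvJB s) jobs).keys.Nodup := by
  intro ps
  induction ps with
  | nil => intro jobs h; exact h
  | cons ab ps ih =>
    intro jobs h
    simp only [List.foldl_cons]
    apply ih
    unfold pvJB
    cases hf : pvFired s ab.1 ab.2 with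
    | none => exact h
    | some sc => exact pvKeys_nodup_insert _ _ _ h

theorem pvTableFold (s : PySem.Set Int) (step : Int) (hgood : 1 ≤ step ∨ step ≤ -2) :
    ∀ (rest : List Int) (d : PySem.Dict Int Int),
      rest.Pairwise (fun x y => if 1 ≤ step then y < x else x < y) →
      (∀ k v, d.get? k = some v → v = pvStable s step k) →
      (∀ x ∈ s, x ∉ rest → (d.get? x).isSome = true) →
      (∀ k v,
          (rest.foldl (fun len c =>
            PySem.Dict.insert len c
              (match pvSuccB s step c with
               | none => 0
               | some nxt => 1 + PySem.Dict.getD len nxt 0)) d).get? k = some v →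
          v = pvStable s step k) ∧
        (∀ x ∈ s,
          ((rest.foldl (fun len c =>
            PySem.Dict.insert len c
              (match pvSuccB s step c with
               | none => 0
               | some nxt => 1 + PySem.Dict.getD len nxt 0)) d).get? x).isSome = true) := by
  intro rest
  induction rest with
  | nil =>
    intro d hpw hent hcov
    exact ⟨fun k v h => hent k v h, fun x hx => hcov x hx (List.not_mem_nil)⟩
  | cons c rest ih =>
    intro d hpw hent hcov
    obtain ⟨hc, hpw'⟩ := List.pairwise_cons.mp hpw
    simp only [List.foldl_cons]
    set v : Int := (match pvSuccB s step c with
      | none => 0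
      | some nxt => 1 + PySem.Dict.getD d nxt 0) with hv
    have hvs : v = pvStable s step c := by
      rw [hv]
      cases hs : pvSuccB s step c with
      | none =>
        simp only []
        unfold pvStable
        rw [pvMoves_none s step c hs]
      | some nxt =>
        simp only []
        obtain ⟨hnxt, hdir⟩ := pvSucc_dir s step c nxt hgood hs
        have hnin : nxt ∉ c :: rest := by
          intro hin
          rcases List.mem_cons.mp hin with rfl | hin
          · split at hdir <;> omega
          · have := hc nxt hin
            split at hdir <;> split at this <;> omega
        have hsome := hcov nxt hnxt hnin
        obtain ⟨w, hw⟩ := Option.isSome_iff_exists.mp hsome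
        have hwv := hent nxt w hw
        have hgd : PySem.Dict.getD d nxt 0 = w := by
          unfold PySem.Dict.getD
          rw [hw]
          rfl
        rw [hgd, hwv, (pvStable_succ s step c nxt hgood hs)]
    have hent' : ∀ k w, (PySem.Dict.insert d c v).get? k = some w → w = pvStable s step k := by
      intro k w hw
      rw [PySem.Dict.get?_insert] at hw
      by_cases hk : k = c
      · rw [if_pos hk] at hw
        subst hk
        rw [← Option.some.inj hw, hvs]
      · rw [if_neg hk] at hw
        exact hent k w hw
    have hcov' : ∀ x ∈ s, x ∉ rest → ((PySem.Dict.insert d c v).get? x).isSome = true := by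
      intro x hx hnx
      rw [PySem.Dict.get?_insert]
      by_cases hk : x = c
      · rw [if_pos hk]; rfl
      · rw [if_neg hk]
        exact hcov x hx (by
          intro hin
          rcases List.mem_cons.mp hin with rfl | hin
          · exact hk rfl
          · exact hnx hin)
    exact ih (PySem.Dict.insert d c v) hpw' hent' hcov' 

theorem pvLenTable_getD (s : PySem.Set Int) (step x : Int) (hgood : 1 ≤ step ∨ step ≤ -2)
    (hnd : s.Nodup) (hx : x ∈ s) :
    (pvLenTable s step).getD x 0 = pvStable s step x := by
  unfold pvLenTable
  have hperm := PySem.List.sorted_perm s (fun x : Int => x) (decide (step > 0))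
  have hnds : (PySem.List.sorted s (fun x : Int => x) (decide (step > 0))).Nodup :=
    (hperm.nodup_iff).mpr hnd
  have hpw : (PySem.List.sorted s (fun x : Int => x) (decide (step > 0))).Pairwise
      (fun x y => if 1 ≤ step then y < x else x < y) := by
    rcases hgood with hg | hg
    · have hrv : decide (step > 0) = true := by simp; omega
      rw [hrv]
      have h1 := PySem.List.sorted_pairwise_rev s (fun x : Int => x)
      have h2 : (PySem.List.sorted s (fun x : Int => x) true).Pairwise (· ≠ ·) := by
        rw [hrv] at hnds
        exact hnds
      have h3 := List.Pairwise.and h1 h2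
      refine h3.imp ?_
      intro a b hab
      rw [if_pos hg]
      rcases hab with ⟨hle, hne⟩
      omega
    · have hrv : decide (step > 0) = false := by simp; omega
      rw [hrv]
      have h1 := PySem.List.sorted_pairwise s (fun x : Int => x)
      have h2 : (PySem.List.sorted s (fun x : Int => x) false).Pairwise (· ≠ ·) := by
        rw [hrv] at hnds
        exact hnds
      have h3 := List.Pairwise.and h1 h2
      refine h3.imp ?_
      intro a b hab
      rw [if_neg (by omega : ¬ (1 ≤ step))]
      rcases hab with ⟨hle, hne⟩
      omega
  have hcov : ∀ y ∈ s, y ∉ PySem.List.sorted s (fun x : Int => x) (decide (step > 0)) →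
      ((PySem.Dict.empty : PySem.Dict Int Int).get? y).isSome = true := by
    intro y hy hny
    exact absurd (hperm.mem_iff.mpr hy) hny
  have hres := pvTableFold s step hgood
    (PySem.List.sorted s (fun x : Int => x) (decide (step > 0)))
    PySem.Dict.empty hpw
    (fun k v h => by rw [PySem.Dict.get?_empty] at h; cases h) hcov
  obtain ⟨hent, hall⟩ := hres
  have hsx := hall x hx
  obtain ⟨w, hw⟩ := Option.isSome_iff_exists.mp hsx
  have hst := hent x w hw
  have hgd : ∀ (dd : PySem.Dict Int Int), PySem.Dict.getD dd x 0 = (dd.get? x).getD 0 :=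
    fun _ => rfl
  rw [hgd, hw]
  simp [hst]

theorem pvStepFold_abs (s : PySem.Set Int) (lmax : Int) (e : Int × PySem.Set Int)
    (hgood : 1 ≤ e.1 ∨ e.1 ≤ -2) (hnd : s.Nodup) (hsub : ∀ c0 ∈ e.2, c0 ∈ s) :
    pvStepFold s lmax e =
      (e.2.map (fun c0 => 3 + pvStable s e.1 c0)).foldl pvMx lmax := by
  unfold pvStepFold
  rw [List.foldl_map]
  apply PySem.List.foldl_congr_mem
  intro acc c0 hc0
  rw [pvLenTable_getD s e.1 c0 hgood hnd (hsub c0 hc0)]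
  rfl

theorem pvMx_init_le : ∀ (l : List Int) (m : Int), m ≤ l.foldl pvMx m := by
  intro l
  induction l with
  | nil => intro m; exact le_refl m
  | cons x xs ih =>
    intro m
    refine le_trans ?_ (ih (pvMx m x))
    unfold pvMx
    split <;> omega

theorem pvMx_mem_le : ∀ (l : List Int) (m x : Int), x ∈ l → x ≤ l.foldl pvMx m := by
  intro l
  induction l with
  | nil => intro m x h; cases h
  | cons y ys ih =>
    intro m x h
    rcases List.mem_cons.mp h with rfl | h
    · refine le_trans ?_ (pvMx_init_le ys (pvMx m x))
      unfold pvMx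
      split <;> omega
    · exact ih (pvMx m y) x h

theorem pvMx_cases : ∀ (l : List Int) (m : Int), l.foldl pvMx m = m ∨ l.foldl pvMx m ∈ l := by
  intro l
  induction l with
  | nil => intro m; exact Or.inl rfl
  | cons x xs ih =>
    intro m
    rcases ih (pvMx m x) with h | h
    · rw [List.foldl_cons, h]
      unfold pvMx
      split
      · exact Or.inr (List.mem_cons_self)
      · exact Or.inl rfl
    · exact Or.inr (List.mem_cons_of_mem _ h)

theorem pvMx_congr (l1 l2 : List Int) (m : Int) (h : ∀ x, x ∈ l1 ↔ x ∈ l2) :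
    l1.foldl pvMx m = l2.foldl pvMx m := by
  have hle : ∀ (l1 l2 : List Int), (∀ x, x ∈ l1 → x ∈ l2) →
      l1.foldl pvMx m ≤ l2.foldl pvMx m := by
    intro l1 l2 hsub
    rcases pvMx_cases l1 m with h | h
    · rw [h]; exact pvMx_init_le l2 m
    · exact pvMx_mem_le l2 m _ (hsub _ h)
  exact le_antisymm (hle l1 l2 (fun x => (h x).mp)) (hle l2 l1 (fun x => (h x).mpr))

theorem pvA_fold (s : PySem.Set Int) (n : Nat) (hn : s.length ≤ n) :
    ∀ (ps : List (Int × Int)) (lmax : Int),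
      (∀ ab ∈ ps, ab.1 ∈ s ∧ pvDivB s ab.1 ab.2 = false) →
      ps.foldl (fun l ab => pvGA n s ab.1 ab.2 l) lmax =
        ((ps.filterMap (fun ab => pvFired s ab.1 ab.2)).map
          (fun sc => 3 + pvStable s sc.1 sc.2)).foldl pvMx lmax := by
  intro ps
  induction ps with
  | nil => intro lmax _; rfl
  | cons ab ps ih =>
    intro lmax h
    obtain ⟨ha, hdiv⟩ := h ab (List.mem_cons_self)
    simp only [List.foldl_cons, List.filterMap_cons]
    rw [pvGA_abs n s ab.1 ab.2 lmax hn ha hdiv]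
    cases hf : pvFired s ab.1 ab.2 with
    | none =>
      simp only [pvCntStep]
      exact ih lmax (fun x hx => h x (List.mem_cons_of_mem _ hx))
    | some sc =>
      simp only [pvCntStep, List.map_cons, List.foldl_cons]
      exact ih (pvMx lmax (3 + pvStable s sc.1 sc.2))
        (fun x hx => h x (List.mem_cons_of_mem _ hx))

theorem pvPairs_fact (A : List Int) (hpre : Pre_find_sequence A) :
    ∀ ab ∈ pvPairs A, ab.1 ∈ PySem.Set.ofList A ∧
      pvDivB (PySem.Set.ofList A) ab.1 ab.2 = false := by
  intro ab hab
  refine ⟨?_, ?_⟩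
  · unfold pvPairs at hab
    obtain ⟨jb, hjb, hmem⟩ := List.mem_flatMap.mp hab
    obtain ⟨i, hi, heq⟩ := List.mem_map.mp hmem
    obtain ⟨hi0, hilt⟩ := (PySem.List.mem_pyRange_one).mp hi
    obtain ⟨k, hk, rfl⟩ := (PySem.List.mem_enumerate_iff _ _ _).mp hjb
    rw [← heq]
    have hil : i < (A.length : Int) := by
      simp only [zero_add] at hilt
      omega
    show PySem.List.pyGetD A i 0 ∈ PySem.Set.ofList A
    rw [PySem.List.pyGetD_eq_getElem A 0 hi0 hil]
    exact (PySem.Set.mem_ofList _ _).mpr (List.getElem_mem _)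
  · unfold Pre_find_sequence at hpre
    rw [List.all_eq_true] at hpre
    have := hpre ab hab
    simpa using this

-- ===== VERDICT (by name: the statement is the Claim_ definition above) =====
theorem find_sequence_spec : Claim_equal_find_sequence := by
  intro A _ hpre
  unfold Spec_find_sequence find_sequence find_sequence_alt
  by_cases hl : A.length = 1
  · simp [hl]
  · simp only [hl, if_false]
    have hnd : (PySem.Set.ofList A).Nodup := PySem.Set.nodup_ofList A
    have hlen : (PySem.Set.ofList A).length ≤ A.length + 2 := by
      have := PySem.Set.length_ofList_le A
      omega
    have hPairs := pvPairs_fact A hpre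
    -- A side: flatten the double loop and abstract each body step
    have hflatA : ∀ (init : Int),
        (PySem.List.enumerate A 0).foldl (fun lmax jb =>
          (PySem.List.pyRange 0 jb.1 1).foldl (pvBodyA A (PySem.Set.ofList A) jb.2) lmax) init =
        (pvPairs A).foldl (fun l ab =>
          pvGA (A.length + 2) (PySem.Set.ofList A) ab.1 ab.2 l) init := by
      intro init
      unfold pvPairs
      rw [List.foldl_flatMap]
      apply PySem.List.foldl_congr_mem
      intro acc jb _
      rw [List.foldl_map]
      apply PySem.List.foldl_congr_mem
      intro acc2 i _
      rw [pvBodyA_eq_GA]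
    -- B side: flatten phase 1
    have hflatB : pvJobs A (PySem.Set.ofList A) =
        (pvPairs A).foldl (pvJB (PySem.Set.ofList A)) PySem.Dict.empty := by
      unfold pvJobs pvPairs
      rw [List.foldl_flatMap]
      apply PySem.List.foldl_congr_mem
      intro acc jb _
      rw [List.foldl_map]
      apply PySem.List.foldl_congr_mem
      intro acc2 i _
      rw [pvBodyB_abs]
    have hkeys : (pvJobs A (PySem.Set.ofList A)).keys.Nodup := by
      rw [hflatB]
      apply pvJobs_keys_nodup
      rw [PySem.Dict.keys_empty]
      exact List.nodup_nil
    have hJM : ∀ st c0, pvJMem (pvJobs A (PySem.Set.ofList A)) st c0 ↔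
        (st, c0) ∈ (pvPairs A).filterMap
          (fun ab => pvFired (PySem.Set.ofList A) ab.1 ab.2) := by
      intro st c0
      rw [hflatB, pvJMem_fold]
      have : ¬ pvJMem (PySem.Dict.empty : PySem.Dict Int (PySem.Set Int)) st c0 := by
        rintro ⟨g, hg, _⟩
        rw [PySem.Dict.get?_empty] at hg
        cases hg
      tauto
    have hGF : ∀ sc ∈ (pvPairs A).filterMap
        (fun ab => pvFired (PySem.Set.ofList A) ab.1 ab.2),
        (1 ≤ sc.1 ∨ sc.1 ≤ -2) ∧ sc.2 ∈ PySem.Set.ofList A := by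
      intro sc hsc
      obtain ⟨ab, hab, hf⟩ := List.mem_filterMap.mp hsc
      obtain ⟨ha, hdiv⟩ := hPairs ab hab
      exact pvFired_good _ ab.1 ab.2 sc.1 sc.2 ha hdiv (by simpa using hf)
    -- B side: phase 2 is a fold of pvMx over the flattened candidate counts
    have hphase2 : (pvJobs A (PySem.Set.ofList A)).items.foldl
        (pvStepFold (PySem.Set.ofList A)) 2 =
        ((pvJobs A (PySem.Set.ofList A)).items.flatMap (fun e =>
          e.2.map (fun c0 => 3 + pvStable (PySem.Set.ofList A) e.1 c0))).foldl pvMx 2 := by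
      rw [List.foldl_flatMap]
      apply PySem.List.foldl_congr_mem
      intro acc e he
      by_cases hg : e.2 = []
      · unfold pvStepFold
        rw [hg]
        rfl
      · obtain ⟨c0, hc0m⟩ := List.exists_mem_of_ne_nil e.2 hg
        have hJMe : ∀ c1 ∈ e.2, pvJMem (pvJobs A (PySem.Set.ofList A)) e.1 c1 := by
          intro c1 hc1
          exact ⟨e.2, PySem.Dict.get?_of_mem_items _ he hkeys, hc1⟩
        have hgood : 1 ≤ e.1 ∨ e.1 ≤ -2 := by
          have hm := (hJM e.1 c0).mp (hJMe c0 hc0m)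
          exact ((hGF (e.1, c0) hm).1)
        have hsub : ∀ c1 ∈ e.2, c1 ∈ PySem.Set.ofList A := by
          intro c1 hc1
          have hm := (hJM e.1 c1).mp (hJMe c1 hc1)
          exact (hGF (e.1, c1) hm).2
        exact pvStepFold_abs (PySem.Set.ofList A) acc e hgood hnd hsub
    rw [hflatA, pvA_fold (PySem.Set.ofList A) (A.length + 2) hlen (pvPairs A) 2 hPairs,
      hphase2]
    apply pvMx_congr
    intro x
    constructor
    · intro hx
      obtain ⟨sc, hsc, rfl⟩ := List.mem_map.mp hx
      have hjm := (hJM sc.1 sc.2).mpr (by simpa using hsc)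
      obtain ⟨g, hget, hc0⟩ := hjm
      apply List.mem_flatMap.mpr
      exact ⟨(sc.1, g), PySem.Dict.mem_items_of_get?_eq_some _ hget,
        List.mem_map.mpr ⟨sc.2, hc0, rfl⟩⟩
    · intro hx
      obtain ⟨e, he, hxe⟩ := List.mem_flatMap.mp hx
      obtain ⟨c0, hc0, rfl⟩ := List.mem_map.mp hxe
      have hjm : pvJMem (pvJobs A (PySem.Set.ofList A)) e.1 c0 :=
        ⟨e.2, PySem.Dict.get?_of_mem_items _ he hkeys, hc0⟩
      have hm := (hJM e.1 c0).mp hjm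
      exact List.mem_map.mpr ⟨(e.1, c0), hm, rfl⟩
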